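-- pv_equiv track=rewrite | github.com/YerongLi/dive | hackerrank/+stripe/hidecard/main.py | mask_specific_card_types
-- ===== SOURCE A (Python) =====
-- def mask_specific_card_types(text):
--     n = len(text)
--     i = 0
--     start = None
--     ans = []
--     def check(number):
--         found = False
--         firsttwo = int(number[:2])
--         first4 = int(number[:4])
--         if 13 <= len(number) <= 16:
--             if 13 == len(number) or len(number) == 16 and number[0] == '4': # VISA
--                 found = True
--             # ans.append((len(number) - 4) * 'x' + text[i-4:i])
--             elif number[:2] == '34' or number[2] == '37' and len(number) == 15: # AX
--                 found = True
--             elif 51 <= firsttwo <= 55 or 2221 <= first4 <= 2720: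
--                 found = True
--         return found
--     i = 0
--     while i < n:
--         if text[i].isdigit():
--             start = i
--             while i < n and text[i].isdigit():
--                 i+= 1
--             number = text[start: i]
--             if check(number):
--                 ans.append((len(number) - 4) * 'x' + number[-4:])
--             else:
--                 ans.append(number)
--         else:
--             ans.append(text[i])
--             i+= 1
--     result = ''.join(ans)
--     return result
-- ===== SOURCE B (Python) =====
-- def mask_specific_card_types(text):
--     def check(number):
--         found = False
--         firsttwo = int(number[:2])
--         first4 = int(number[:4])
--         if 13 <= len(number) <= 16:
--             if 13 == len(number) or len(number) == 16 and number[0] == '4': # VISA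
--                 found = True
--             elif number[:2] == '34' or number[2] == '37' and len(number) == 15: # AX
--                 found = True
--             elif 51 <= firsttwo <= 55 or 2221 <= first4 <= 2720:
--                 found = True
--         return found
--
--     def repl(number):
--         if check(number):
--             return 'x' * (len(number) - 4) + number[-4:]
--         return number
--
--     # one grouping fold: maximal runs of equal digit-ness, then map repl over digit runs
--     runs = []
--     for ch in text:
--         d = ch.isdigit()
--         if runs and runs[-1][0] == d:
--             runs[-1][1].append(ch)
--         else:
--             runs.append((d, [ch]))
--     return ''.join(repl(''.join(cs)) if d else ''.join(cs) for d, cs in runs)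
-- ===== Notes on version B (the rewrite author's own statement) =====
-- stated objective: idiomatic
-- what changed: Replaced the index-based while-loop with nested digit scan and per-character appends by one grouping fold into maximal digit/non-digit runs followed by a repl map over the runs (the check helper is kept verbatim).
import Mathlib
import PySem

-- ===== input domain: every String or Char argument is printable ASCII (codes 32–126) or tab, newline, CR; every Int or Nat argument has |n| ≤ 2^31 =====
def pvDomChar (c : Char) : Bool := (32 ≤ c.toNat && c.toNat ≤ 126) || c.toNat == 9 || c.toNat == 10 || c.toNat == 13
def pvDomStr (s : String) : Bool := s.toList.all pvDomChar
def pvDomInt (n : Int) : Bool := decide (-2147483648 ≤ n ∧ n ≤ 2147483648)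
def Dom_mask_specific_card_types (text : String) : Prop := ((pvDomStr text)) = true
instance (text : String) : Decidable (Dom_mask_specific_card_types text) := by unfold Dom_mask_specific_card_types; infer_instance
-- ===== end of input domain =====

-- B replaces A's index-based scan (inner digit while-loop, per-character appends) by one
-- grouping fold into maximal digit/non-digit runs plus a repl map; objective: idiomatic.

-- ===== PORT A =====
-- `check(number)`: verbatim in both Pythons, so one shared helper serves both ports.
-- Python's `number[2] == '37'` compares a 1-char string with '37' (always False);
-- ported literally as the (always-false) comparison of the singleton list with ['3','7'].
def pvCheck (number : List Char) : Bool :=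
  let firsttwo := (PySem.Int.ofChars? (PySem.List.slice number none (some 2))).getD 0
  let first4 := (PySem.Int.ofChars? (PySem.List.slice number none (some 4))).getD 0
  if 13 ≤ number.length ∧ number.length ≤ 16 then
    if number.length = 13 ∨ (number.length = 16 ∧ PySem.List.pyGet? number 0 = some '4') then
      true
    else if PySem.List.slice number none (some 2) = ['3', '4'] ∨
        ((PySem.List.pyGet? number 2).map (fun c => [c]) = some ['3', '7'] ∧ number.length = 15) then
      true
    else if (51 ≤ firsttwo ∧ firsttwo ≤ 55) ∨ (2221 ≤ first4 ∧ first4 ≤ 2720) then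
      true
    else false
  else false

-- `(len(number) - 4) * 'x' + number[-4:]` vs plain number — the identical expression in both Pythons.
def pvMaskRun (number : List Char) : List Char :=
  if pvCheck number then List.replicate (number.length - 4) 'x' ++ PySem.List.slice number (some (-4)) none
  else number

def pvDig (c : Char) : Bool := PySem.Chars.strIsdigit [c]

-- A's while-loop: scan, on a digit take the maximal digit run, else emit the single char.
def pvLoopA (cs : List Char) (ans : List (List Char)) : List (List Char) :=
  match cs with
  | [] => ans
  | c :: rest =>
    if h : pvDig c = true then
      let number := (c :: rest).takeWhile pvDig
      pvLoopA ((c :: rest).dropWhile pvDig) (ans ++ [pvMaskRun number])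
    else
      pvLoopA rest (ans ++ [[c]])
termination_by cs.length
decreasing_by
  · simp only [List.dropWhile_cons, h, if_pos]
    exact Nat.lt_succ_of_le (List.length_dropWhile_le pvDig rest)
  · simp

def mask_specific_card_types (text : String) : String :=
  String.ofList (pvLoopA text.toList []).flatten

-- ===== PORT B =====
-- Source B's grouping loop: `runs[-1]` is the head of the reversed accumulator, run chars
-- are accumulated reversed (append-at-end = cons on the reversed run); undone at the end.
def pvStepB (runs : List (Bool × List Char)) (ch : Char) : List (Bool × List Char) :=
  let d := pvDig ch
  match runs with
  | (ld, run) :: rs => if ld = d then (ld, ch :: run) :: rs else (d, [ch]) :: (ld, run) :: rs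
  | [] => [(d, [ch])]

def pvRunsB (cs : List Char) : List (Bool × List Char) :=
  ((cs.foldl pvStepB []).map (fun p => (p.1, p.2.reverse))).reverse

def mask_specific_card_types_alt (text : String) : String :=
  String.ofList ((pvRunsB text.toList).map (fun p => if p.1 then pvMaskRun p.2 else p.2)).flatten

-- ===== PRECONDITION & SPEC =====
def Spec_mask_specific_card_types (text : String) (out : String) : Prop := out = mask_specific_card_types_alt text
instance (text : String) (out : String) : Decidable (Spec_mask_specific_card_types text out) := by unfold Spec_mask_specific_card_types; infer_instance

-- ===== CLAIM (what is proved, stated in full; the proofs are below) =====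
def Claim_equal_mask_specific_card_types : Prop := ∀ (text : String), Dom_mask_specific_card_types text → Spec_mask_specific_card_types text (mask_specific_card_types text)

-- ===== LEMMAS AND PROOFS =====

-- rendered output of B on a list of chars
def pvOutB (cs : List Char) : List Char :=
  ((pvRunsB cs).map (fun p => if p.1 then pvMaskRun p.2 else p.2)).flatten

lemma pv_tail_fold (cs : List Char) (a : Bool × List Char) (as_ : List (Bool × List Char)) :
    cs.foldl pvStepB (a :: as_) = cs.foldl pvStepB [a] ++ as_ := by
  induction cs generalizing a as_ with
  | nil => simp
  | cons c rest ih =>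
      obtain ⟨ld, run⟩ := a
      by_cases h : ld = pvDig c
      · rw [List.foldl_cons, List.foldl_cons,
          show pvStepB ((ld, run) :: as_) c = (ld, c :: run) :: as_ by simp [pvStepB, h],
          show pvStepB [(ld, run)] c = [(ld, c :: run)] by simp [pvStepB, h], ih]
      · rw [List.foldl_cons, List.foldl_cons,
          show pvStepB ((ld, run) :: as_) c = (pvDig c, [c]) :: (ld, run) :: as_ by
            simp [pvStepB, h],
          show pvStepB [(ld, run)] c = (pvDig c, [c]) :: [(ld, run)] by simp [pvStepB, h],
          ih, ih (as_ := [(ld, run)])]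
        simp

lemma pv_run_fold (run : List Char) (d : Bool) (hrun : ∀ x ∈ run, pvDig x = d)
    (racc : List Char) (rs : List (Bool × List Char)) :
    run.foldl pvStepB ((d, racc) :: rs) = (d, run.reverse ++ racc) :: rs := by
  induction run generalizing racc with
  | nil => simp
  | cons x run' ih =>
      have hx : pvDig x = d := hrun x (by simp)
      rw [List.foldl_cons,
        show pvStepB ((d, racc) :: rs) x = (d, x :: racc) :: rs by simp [pvStepB, hx],
        ih (fun y hy => hrun y (by simp [hy]))]
      simp

lemma pv_fresh (c : Char) (r : List Char) (a : Bool × List Char)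
    (as_ : List (Bool × List Char)) (h : a.1 ≠ pvDig c) :
    (c :: r).foldl pvStepB (a :: as_) = (c :: r).foldl pvStepB [] ++ a :: as_ := by
  obtain ⟨ld, run⟩ := a
  rw [List.foldl_cons, List.foldl_cons,
    show pvStepB ((ld, run) :: as_) c = (pvDig c, [c]) :: (ld, run) :: as_ by
      simp [pvStepB, h],
    show pvStepB [] c = [(pvDig c, [c])] by simp [pvStepB],
    pv_tail_fold]

-- decomposition of B's fold along the maximal leading run
lemma pv_foldB_decomp (c : Char) (rest : List Char) :
    (c :: rest).foldl pvStepB [] =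
      ((c :: rest).dropWhile (fun x => pvDig x == pvDig c)).foldl pvStepB [] ++
        [(pvDig c, ((c :: rest).takeWhile (fun x => pvDig x == pvDig c)).reverse)] := by
  have hc : (pvDig c == pvDig c) = true := by simp
  rw [List.takeWhile_cons, List.dropWhile_cons]
  simp only [hc, if_true]
  have hsplit : rest = rest.takeWhile (fun x => pvDig x == pvDig c) ++
      rest.dropWhile (fun x => pvDig x == pvDig c) := (List.takeWhile_append_dropWhile).symm
  rw [List.foldl_cons, show pvStepB [] c = [(pvDig c, [c])] by simp [pvStepB]]
  conv_lhs => rw [hsplit]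
  rw [List.foldl_append,
    pv_run_fold (rest.takeWhile (fun x => pvDig x == pvDig c)) (pvDig c)
      (fun x hx => by simpa using (List.mem_takeWhile_imp hx)) [c] []]
  cases hr : rest.dropWhile (fun x => pvDig x == pvDig c) with
  | nil => simp
  | cons y r' =>
      have hy : pvDig y ≠ pvDig c := by
        intro hcontra
        have h1 : rest.dropWhile (fun x => pvDig x == pvDig c) ≠ [] := by rw [hr]; simp
        have h2 := List.head_dropWhile_not (fun x => pvDig x == pvDig c) h1
        have h3 : (rest.dropWhile fun x => pvDig x == pvDig c).head h1 = y := by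
          simp [hr]
        rw [h3] at h2
        simp [hcontra] at h2
      rw [pv_fresh y r' _ [] (by simpa using fun h => hy h.symm)]
      simp

lemma pvRunsB_decomp (c : Char) (rest : List Char) :
    pvRunsB (c :: rest) =
      (pvDig c, (c :: rest).takeWhile (fun x => pvDig x == pvDig c)) ::
        pvRunsB ((c :: rest).dropWhile (fun x => pvDig x == pvDig c)) := by
  unfold pvRunsB
  rw [pv_foldB_decomp]
  simp

lemma pvOutB_decomp (c : Char) (rest : List Char) :
    pvOutB (c :: rest) =
      (if pvDig c then pvMaskRun ((c :: rest).takeWhile (fun x => pvDig x == pvDig c))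
        else (c :: rest).takeWhile (fun x => pvDig x == pvDig c)) ++
      pvOutB ((c :: rest).dropWhile (fun x => pvDig x == pvDig c)) := by
  unfold pvOutB
  rw [pvRunsB_decomp]
  simp

lemma pvLoopA_acc (cs : List Char) (ans : List (List Char)) :
    pvLoopA cs ans = ans ++ pvLoopA cs [] := by
  have H : ∀ n (cs : List Char), cs.length ≤ n → ∀ ans,
      pvLoopA cs ans = ans ++ pvLoopA cs [] := by
    intro n
    induction n with
    | zero =>
        intro cs hcs ans
        have : cs = [] := List.length_eq_zero_iff.mp (Nat.le_zero.mp hcs)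
        subst this; simp [pvLoopA]
    | succ n ih =>
        intro cs hcs ans
        match cs with
        | [] => simp [pvLoopA]
        | c :: rest =>
          by_cases h : pvDig c = true
          · rw [pvLoopA, pvLoopA]
            simp only [h, dif_pos, List.nil_append]
            have hlen : ((c :: rest).dropWhile pvDig).length ≤ n := by
              have h1 : (c :: rest).dropWhile pvDig = rest.dropWhile pvDig := by
                simp [h]
              rw [h1]
              exact le_trans (List.length_dropWhile_le pvDig rest)
                (Nat.le_of_succ_le_succ hcs)
            rw [ih _ hlen, ih _ hlen [pvMaskRun ((c :: rest).takeWhile pvDig)]]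
            simp
          · rw [pvLoopA, pvLoopA, dif_neg h, dif_neg h, List.nil_append]
            have hlen : rest.length ≤ n := Nat.le_of_succ_le_succ hcs
            rw [ih _ hlen, ih _ hlen [[c]]]
            simp
  exact H cs.length cs le_rfl ans

lemma pvLoopA_nondigit_run (t : List Char) (ht : ∀ x ∈ t, pvDig x = false) (r : List Char) :
    (pvLoopA (t ++ r) []).flatten = t ++ (pvLoopA r []).flatten := by
  induction t with
  | nil => simp
  | cons x t' ih =>
      have hx : pvDig x = false := ht x (by simp)
      rw [List.cons_append, pvLoopA, dif_neg (by simp [hx])]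
      rw [pvLoopA_acc, List.flatten_append,
        ih (fun y hy => ht y (by simp [hy]))]
      simp

lemma pv_main (cs : List Char) :
    (pvLoopA cs []).flatten = pvOutB cs := by
  have H : ∀ n (cs : List Char), cs.length ≤ n →
      (pvLoopA cs []).flatten = pvOutB cs := by
    intro n
    induction n with
    | zero =>
        intro cs hcs
        have : cs = [] := List.length_eq_zero_iff.mp (Nat.le_zero.mp hcs)
        subst this
        simp [pvLoopA, pvOutB, pvRunsB]
    | succ n ih =>
        intro cs hcs
        match cs with
        | [] => simp [pvLoopA, pvOutB, pvRunsB]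
        | c :: rest =>
          have hdroplen : ∀ (p : Char → Bool), p c = true →
              ((c :: rest).dropWhile p).length ≤ n := by
            intro p hp
            rw [List.dropWhile_cons, if_pos hp]
            exact le_trans (List.length_dropWhile_le p rest) (Nat.le_of_succ_le_succ hcs)
          by_cases h : pvDig c = true
          · have hpred : (fun x => pvDig x == pvDig c) = pvDig := by
              funext x; rw [h]; cases hx : pvDig x <;> simp
            rw [pvOutB_decomp, hpred, if_pos h, pvLoopA]
            simp only [h, dif_pos, List.nil_append]
            rw [pvLoopA_acc, List.flatten_append, ih _ (hdroplen pvDig h)]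
            simp
          · have h' : pvDig c = false := by simpa using h
            have hpred : (fun x => pvDig x == pvDig c) = (fun x => !pvDig x) := by
              funext x; rw [h']; cases hx : pvDig x <;> simp
            rw [pvOutB_decomp, if_neg (by simp [h']), hpred]
            have hsplit : c :: rest =
                (c :: rest).takeWhile (fun x => !pvDig x) ++
                  (c :: rest).dropWhile (fun x => !pvDig x) :=
              (List.takeWhile_append_dropWhile).symm
            conv_lhs => rw [hsplit]
            rw [pvLoopA_nondigit_run _
              (fun x hx => by simpa using (List.mem_takeWhile_imp hx)),
              ih _ (hdroplen _ (by simp [h']))]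
  exact H cs.length cs le_rfl

-- ===== VERDICT (by name: the statement is the Claim_ definition above) =====
theorem mask_specific_card_types_spec : Claim_equal_mask_specific_card_types := by
  intro text _
  unfold Spec_mask_specific_card_types mask_specific_card_types mask_specific_card_types_alt
  rw [pv_main]
  rfl
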